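-- pv_equiv track=rewrite | github.com/SeanM743/coding-problems | rec_football_score.py | find_scoring
-- ===== SOURCE A (Python) =====
-- def find_scoring(points, ways_to_score=[2, 3, 7]):
--     def score_finder(points, scores, result):
--         if points == 0:
--             result.append(scores[:])
--         elif points > 0:
--             for val in ways_to_score:
--                 scores.append(val)
--                 score_finder(points - val, scores, result)
--                 scores.pop()
--
--         return result
--
--     return score_finder(points, [], [])
-- ===== SOURCE B (Python) =====
-- def find_scoring(points, ways_to_score=[2, 3, 7]):
--     if points < 0:
--         return []
--     table = [[] for _ in range(points + 1)]
--     table[0] = [[]]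
--     for n in range(1, points + 1):
--         table[n] = [[val] + seq
--                     for val in ways_to_score if n - val >= 0
--                     for seq in table[n - val]]
--     return table[points]
-- ===== Notes on version B (the rewrite author's own statement) =====
-- stated objective: alternative
-- what changed: Replaced A's mutating depth-first recursion over shared scores/result accumulators with an iterative bottom-up dynamic-programming table: row n lists all sequences summing to n, built from the earlier rows, and row points is returned.
import Mathlib
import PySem

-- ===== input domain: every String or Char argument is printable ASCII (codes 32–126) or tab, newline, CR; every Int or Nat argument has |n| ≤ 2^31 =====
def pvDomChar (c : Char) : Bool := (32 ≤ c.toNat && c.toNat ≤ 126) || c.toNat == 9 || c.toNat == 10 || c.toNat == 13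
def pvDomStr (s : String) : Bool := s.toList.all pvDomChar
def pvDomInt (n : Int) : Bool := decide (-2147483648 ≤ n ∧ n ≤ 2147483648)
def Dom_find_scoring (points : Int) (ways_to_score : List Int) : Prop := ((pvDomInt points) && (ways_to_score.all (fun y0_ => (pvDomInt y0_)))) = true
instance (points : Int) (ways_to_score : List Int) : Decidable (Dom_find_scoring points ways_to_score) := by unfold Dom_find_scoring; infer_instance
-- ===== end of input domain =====

-- B replaces A's mutating DFS with a bottom-up dynamic-programming table over 0..points;
-- equivalence is about return values only (A mutates only its own local lists).
-- ===== PORT A =====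
-- Fuel (points.toNat + 1) makes A's recursion total in Lean; under Pre_find_scoring every
-- recursive call strictly decreases points.toNat, so the fuel is never exhausted and
-- the port computes exactly what the Python computes.
def scoreFinderA (ways_to_score : List Int) : Nat → Int → List Int → List (List Int) → List (List Int)
  | fuel, points, scores, result =>
    if points = 0 then result ++ [scores]
    else if 0 < points then
      match fuel with
      | 0 => result
      | fuel + 1 =>
        ways_to_score.foldl
          (fun res val => scoreFinderA ways_to_score fuel (points - val) (scores ++ [val]) res)
          result
    else result

def find_scoring (points : Int) (ways_to_score : List Int) : List (List Int) :=
  scoreFinderA ways_to_score (points.toNat + 1) points [] []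

-- ===== PORT B =====
-- One row of the DP table: the Python comprehension
-- [[val] + seq for val in ways_to_score if n - val >= 0 for seq in table[n - val]].
-- The Python prefills table with [] rows and assigns row n in order; the Lean fold appends
-- each finished row, so getD reads the same values the Python reads on every admitted input
-- (inside Pre_ each read index n - val lies in the already-built prefix; an unbuilt or
-- out-of-range index yields [] in both).
def tableRowB (ways_to_score : List Int) (t : List (List (List Int))) (n : Int) : List (List Int) :=
  ways_to_score.flatMap (fun val =>
    if 0 ≤ n - val then (t.getD (n - val).toNat []).map (fun seq => val :: seq) else [])

def find_scoring_alt (points : Int) (ways_to_score : List Int) : List (List Int) :=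
  if points < 0 then []
  else
    ((PySem.List.pyRange 1 (points + 1) 1).foldl
        (fun t n => t ++ [tableRowB ways_to_score t n]) [[[]]]).getD points.toNat []

-- ===== PRECONDITION & SPEC =====
-- Pre_ excludes exactly the inputs on which A raises RecursionError: points > 0 with
-- some non-positive way to score, where A's recursion never terminates.
def Pre_find_scoring (points : Int) (ways_to_score : List Int) : Prop :=
  points ≤ 0 ∨ ∀ v ∈ ways_to_score, 0 < v
instance (points : Int) (ways_to_score : List Int) : Decidable (Pre_find_scoring points ways_to_score) := by unfold Pre_find_scoring; infer_instance
def pvWitness_find_scoring : Int × List Int := (7, [2, 3, 7])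

def Spec_find_scoring (points : Int) (ways_to_score : List Int) (out : List (List Int)) : Prop := out = find_scoring_alt points ways_to_score
instance (points : Int) (ways_to_score : List Int) (out : List (List Int)) : Decidable (Spec_find_scoring points ways_to_score out) := by unfold Spec_find_scoring; infer_instance

-- ===== CLAIM (what is proved, stated in full; the proofs are below) =====
def Claim_equal_find_scoring : Prop := ∀ (points : Int) (ways_to_score : List Int), Dom_find_scoring points ways_to_score → Pre_find_scoring points ways_to_score → Spec_find_scoring points ways_to_score (find_scoring points ways_to_score)

-- ===== LEMMAS AND PROOFS =====

-- Proof-side reference recursion: the pure value of A's DFS at a given fuel.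
def pvRef (ways_to_score : List Int) : Nat → Int → List (List Int)
  | fuel, points =>
    if points = 0 then [[]]
    else if points < 0 then []
    else
      match fuel with
      | 0 => []
      | fuel + 1 =>
        ways_to_score.foldl
          (fun result val =>
            result ++ (pvRef ways_to_score fuel (points - val)).map (fun seq => val :: seq))
          []

theorem foldl_shift (ways : List Int) (fuel : Nat) (points : Int) :
    ∀ (ws : List Int) (init : List (List Int)),
      ws.foldl (fun result val =>
          result ++ (pvRef ways fuel (points - val)).map (fun seq => val :: seq)) init
        = init ++ ws.foldl (fun result val =>
            result ++ (pvRef ways fuel (points - val)).map (fun seq => val :: seq)) [] := by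
  intro ws
  induction ws with
  | nil => simp
  | cons v ws ih =>
    intro init
    simp only [List.foldl_cons, List.nil_append]
    rw [ih (init ++ (pvRef ways fuel (points - v)).map (fun seq => v :: seq)),
        ih ((pvRef ways fuel (points - v)).map (fun seq => v :: seq))]
    simp

theorem main_lemma : ∀ (ways : List Int) (fuel : Nat) (points : Int) (scores : List Int) (result : List (List Int)),
    scoreFinderA ways fuel points scores result
      = result ++ (pvRef ways fuel points).map (fun seq => scores ++ seq) := by
  intro ways fuel
  induction fuel with
  | zero =>
    intro points scores result
    unfold scoreFinderA pvRef
    split_ifs <;> simp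
  | succ fuel ih =>
    intro points scores result
    unfold scoreFinderA pvRef
    by_cases h1 : points = 0
    · simp [h1]
    · by_cases h2 : 0 < points
      · have h3 : ¬ points < 0 := by omega
        simp only [h1, h2, h3, if_true, if_false]
        have aux : ∀ (ws : List Int) (result : List (List Int)),
            ws.foldl (fun res val => scoreFinderA ways fuel (points - val) (scores ++ [val]) res) result
              = result ++ (ws.foldl (fun result val =>
                  result ++ (pvRef ways fuel (points - val)).map (fun seq => val :: seq)) []).map
                    (fun seq => scores ++ seq) := by
          intro ws
          induction ws with
          | nil => simp
          | cons v ws ihw =>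
            intro result
            simp only [List.foldl_cons, List.nil_append]
            rw [ihw, foldl_shift, ih]
            simp [List.map_map, Function.comp_def]
        exact aux ways result
      · have h3 : points < 0 := by omega
        simp [h1, h2, h3]

theorem foldl_app_congr {α β : Type} (l : List α) (f g : α → List β)
    (h : ∀ x ∈ l, f x = g x) :
    ∀ init, l.foldl (fun acc x => acc ++ f x) init = l.foldl (fun acc x => acc ++ g x) init := by
  induction l with
  | nil => intro init; rfl
  | cons a l ih =>
    intro init
    simp only [List.foldl_cons]
    rw [h a (by simp), ih (fun x hx => h x (by simp [hx]))]

theorem flatMap_congr_mem {α β : Type} (l : List α) (f g : α → List β)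
    (h : ∀ x ∈ l, f x = g x) : l.flatMap f = l.flatMap g := by
  induction l with
  | nil => rfl
  | cons a l ih =>
    simp only [List.flatMap_cons]
    rw [h a (by simp), ih (fun x hx => h x (by simp [hx]))]

theorem pvRef_fuel (ways : List Int) (hpos : ∀ v ∈ ways, 0 < v) :
    ∀ (f1 : Nat) (points : Int) (f2 : Nat), points.toNat ≤ f1 → points.toNat ≤ f2 →
      pvRef ways f1 points = pvRef ways f2 points := by
  intro f1
  induction f1 with
  | zero =>
    intro points f2 h1 h2
    have : points ≤ 0 := by omega
    unfold pvRef
    rcases lt_or_eq_of_le this with h | h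
    · simp [h, show points ≠ 0 by omega]
    · simp [h]
  | succ f1 ih =>
    intro points f2 h1 h2
    by_cases hz : points = 0
    · unfold pvRef; simp [hz]
    · by_cases hn : points < 0
      · unfold pvRef; simp [hz, hn]
      · match f2 with
        | 0 => omega
        | f2 + 1 =>
          unfold pvRef
          simp only [hz, hn, if_false]
          exact foldl_app_congr ways _ _
            (fun val hval => by
              rw [ih (points - val) f2
                    (by have := hpos val hval; omega)
                    (by have := hpos val hval; omega)]) []

theorem foldl_app_eq_flatMap {α β : Type} (l : List α) (f : α → List β) :
    ∀ init, l.foldl (fun acc x => acc ++ f x) init = init ++ l.flatMap f := by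
  induction l with
  | nil => intro init; simp
  | cons a l ih => intro init; simp [List.foldl_cons, ih]

theorem table_inv (ways : List Int) (hpos : ∀ v ∈ ways, 0 < v) :
    ∀ (m : Nat),
      (PySem.List.pyRange 1 ((m : Int) + 1) 1).foldl
          (fun t n => t ++ [tableRowB ways t n]) [[[]]]
        = (List.range (m + 1)).map (fun k => pvRef ways k (k : Int)) := by
  intro m
  induction m with
  | zero =>
    rw [PySem.List.pyRange_one_eq_nil (by omega)]
    simp [List.range_succ, pvRef]
  | succ m ih =>
    have hsplit : PySem.List.pyRange 1 ((m : Int) + 1 + 1) 1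
        = PySem.List.pyRange 1 ((m : Int) + 1) 1 ++ [(m : Int) + 1] := by
      exact_mod_cast PySem.List.pyRange_one_succ_right (a := 1) (b := (m : Int) + 1) (by omega)
    rw [show ((m + 1 : Nat) : Int) + 1 = (m : Int) + 1 + 1 by push_cast; ring, hsplit,
        List.foldl_append, ih]
    rw [List.range_succ (n := m + 1), List.map_append]
    simp only [List.foldl_cons, List.foldl_nil, List.map_cons, List.map_nil]
    congr 1
    -- remaining: the new row equals pvRef at m+1
    have hN : ((m + 1 : Nat) : Int) = (m : Int) + 1 := by push_cast; ring
    unfold tableRowB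
    conv_rhs => rw [show ((m + 1 : Nat) : Int) = (m : Int) + 1 from hN]
    have h0 : ¬ ((m : Int) + 1 = 0) := by omega
    have h1 : ¬ ((m : Int) + 1 < 0) := by omega
    conv_rhs => rw [pvRef]
    simp only [h0, h1, if_false]
    rw [foldl_app_eq_flatMap, List.nil_append]
    congr 1
    refine flatMap_congr_mem ways _ _ (fun val hval => ?_)
    have hv := hpos val hval
    by_cases hge : 0 ≤ (m : Int) + 1 - val
    · have hk : ((m : Int) + 1 - val).toNat < m + 1 := by omega
      simp only [hge, if_true]
      rw [List.getD_eq_getElem?_getD, List.getElem?_map,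
          List.getElem?_range (by simpa using hk)]
      simp only [Option.map_some, Option.getD_some]
      congr 1
      rw [pvRef_fuel ways hpos (((m : Int) + 1 - val).toNat)
            (((((m : Int) + 1 - val).toNat : Nat) : Int)) m (by omega) (by omega)]
      congr 1
      omega
    · have hlt : (m : Int) + 1 - val < 0 := by omega
      simp only [hge, if_false]
      rw [show pvRef ways m ((m : Int) + 1 - val) = [] by
        unfold pvRef; simp [show (m : Int) + 1 - val ≠ 0 by omega, hlt]]
      simp

-- ===== VERDICT (by name: the statement is the Claim_ definition above) =====
theorem find_scoring_spec : Claim_equal_find_scoring := by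
  intro points ways _ hpre
  unfold Spec_find_scoring find_scoring find_scoring_alt
  rw [main_lemma]
  simp only [List.nil_append, List.map_id']
  by_cases hn : points < 0
  · rw [if_pos hn]
    unfold pvRef
    simp [show points ≠ 0 by omega, hn]
  · rw [if_neg hn]
    by_cases hz : points = 0
    · subst hz
      rw [PySem.List.pyRange_one_eq_nil (by omega)]
      unfold pvRef
      simp
    · have hpos : ∀ v ∈ ways, 0 < v := by
        rcases hpre with h | h
        · omega
        · exact h
      obtain ⟨m, hm⟩ : ∃ m : Nat, points = (m : Int) :=
        ⟨points.toNat, by omega⟩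
      subst hm
      rw [table_inv ways hpos m]
      rw [List.getD_eq_getElem?_getD, List.getElem?_map,
          List.getElem?_range (by omega)]
      simp only [Option.map_some, Option.getD_some, Int.toNat_natCast]
      exact pvRef_fuel ways hpos _ _ m (by simp) (by simp)
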